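-- pv_equiv track=rewrite | github.com/EunGyeongKim/Coding_test | programmers/대충만든자판.py | solution
-- ===== SOURCE A (Python) =====
-- def solution(a, b):
--     tmp = []
--     min_alpha = {}
--
--     for i in a:
--         for a, j in enumerate(i):
--             if j not in tmp:
--                 tmp.append(j)
--                 min_alpha[j] = a+1
--             else:
--                 min_alpha[j] = min(min_alpha[j], a+1)
--
--     answer = []
--     for i in b:
--         count = 0
--         for j in i:
--             if j in min_alpha:
--                 count += min_alpha[j]
--             else:
--                 count = -1
--                 break
--         if count != 0:
--             answer.append(count)
--         else:
--             answer.append(-1)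
--
--
--     return answer
-- ===== SOURCE B (Python) =====
-- def solution(a, b):
--     def best(ch):
--         m = None
--         for layout in a:
--             p = layout.find(ch)
--             if p != -1 and (m is None or p + 1 < m):
--                 m = p + 1
--         return m
--
--     def score(word):
--         total = 0
--         for ch in word:
--             m = best(ch)
--             if m is None:
--                 return -1
--             total += m
--         return total if total != 0 else -1
--
--     return [score(w) for w in b]
-- ===== Notes on version B (the rewrite author's own statement) =====
-- stated objective: alternative
-- what changed: B removes A's precomputed tmp-list/min-position dict entirely: for each target character it scans every keypad layout with str.find and keeps the minimum (index+1), with an early return -1 for an unfound character.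
import Mathlib
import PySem

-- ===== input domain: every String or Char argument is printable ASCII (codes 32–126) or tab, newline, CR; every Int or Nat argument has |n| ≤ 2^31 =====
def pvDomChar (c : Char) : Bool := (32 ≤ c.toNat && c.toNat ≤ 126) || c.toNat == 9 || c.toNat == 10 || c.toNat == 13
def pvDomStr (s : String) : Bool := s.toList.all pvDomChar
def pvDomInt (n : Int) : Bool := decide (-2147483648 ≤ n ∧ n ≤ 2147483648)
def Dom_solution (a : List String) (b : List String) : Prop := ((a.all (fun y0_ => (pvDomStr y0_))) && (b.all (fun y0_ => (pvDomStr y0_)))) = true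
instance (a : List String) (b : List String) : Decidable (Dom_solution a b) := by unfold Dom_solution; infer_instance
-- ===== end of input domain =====

-- B drops A's precomputed min-position dict and instead scans every keypad layout
-- with .find for each target character (objective: alternative decomposition, no dict pass).

-- ===== PORT A =====
-- inner loop body: 'for a, j in enumerate(i): if j not in tmp: … else: …'
-- (the else-branch lookup min_alpha[j] always succeeds in Python because j ∈ tmp
--  implies the key was inserted; ported with getD, exact under that invariant)
def pvInnerStep (st : List Char × PySem.Dict Char Int) (p : Int × Char) :
    List Char × PySem.Dict Char Int :=
  if st.1.contains p.2 = false then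
    (st.1 ++ [p.2], st.2.insert p.2 (p.1 + 1))
  else
    (st.1, st.2.insert p.2 (min (st.2.getD p.2 0) (p.1 + 1)))

-- 'for j in i: if j in min_alpha: count += min_alpha[j] else: count = -1; break'
def pvCountA (d : PySem.Dict Char Int) : List Char → Int → Int
  | [], count => count
  | j :: rest, count =>
    match d.get? j with
    | some v => pvCountA d rest (count + v)
    | none => -1

def solution (a : List String) (b : List String) : List Int :=
  let st := a.foldl (fun st i => (PySem.List.enumerate i.toList 0).foldl pvInnerStep st)
    ([], PySem.Dict.empty)
  b.foldl (fun answer i =>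
    let count := pvCountA st.2 i.toList 0
    if count ≠ 0 then answer ++ [count] else answer ++ [-1]) []

-- ===== PORT B =====
-- one layout of the scan in best(ch): 'p = layout.find(ch); if p != -1 and (m is None or p+1 < m): m = p+1'
def pvBestStep (ch : Char) (m : Option Int) (layout : String) : Option Int :=
  let p := PySem.Str.find layout (String.ofList [ch])
  if p = -1 then m
  else
    match m with
    | none => some (p + 1)
    | some v => if p + 1 < v then some (p + 1) else m

def pvBest (a : List String) (ch : Char) : Option Int :=
  a.foldl (pvBestStep ch) none

-- score(word): early 'return -1' on an unfound character, final 'total if total != 0 else -1'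
def pvScore (a : List String) : List Char → Int → Int
  | [], total => if total ≠ 0 then total else -1
  | ch :: rest, total =>
    match pvBest a ch with
    | none => -1
    | some m => pvScore a rest (total + m)

def solution_alt (a : List String) (b : List String) : List Int :=
  b.map (fun w => pvScore a w.toList 0)

-- ===== PRECONDITION & SPEC =====
def Spec_solution (a : List String) (b : List String) (out : List Int) : Prop := out = solution_alt a b
instance (a : List String) (b : List String) (out : List Int) : Decidable (Spec_solution a b out) := by unfold Spec_solution; infer_instance

-- ===== CLAIM (what is proved, stated in full; the proofs are below) =====
def Claim_equal_solution : Prop := ∀ (a : List String) (b : List String), Dom_solution a b → Spec_solution a b (solution a b)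

-- ===== LEMMAS AND PROOFS =====

-- option-minimum, the common specification of both programs' "best position so far"
def pvMerge : Option Int → Option Int → Option Int
  | none, o => o
  | some v, none => some v
  | some v, some w => some (min v w)

-- minimum of (index+1) over all occurrences of c in s, indices starting at k
def pvAllMin (c : Char) : List Char → Int → Option Int
  | [], _ => none
  | x :: t, k => pvMerge (if x = c then some (k + 1) else none) (pvAllMin c t (k + 1))

theorem pvMerge_min_assoc (v w : Int) (o : Option Int) :
    pvMerge (some (min v w)) o = pvMerge (some v) (pvMerge (some w) o) := by
  cases o <;> simp [pvMerge, min_assoc]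

theorem pvAllMin_lb (c : Char) (s : List Char) :
    ∀ (k v : Int), pvAllMin c s k = some v → k + 1 ≤ v := by
  induction s with
  | nil => intro k v h; simp [pvAllMin] at h
  | cons x t ih =>
    intro k v h
    by_cases hx : x = c <;> simp [pvAllMin, hx] at h
    · cases ht : pvAllMin c t (k + 1) with
      | none => rw [ht] at h; simp [pvMerge] at h; omega
      | some u =>
        rw [ht] at h; simp [pvMerge] at h
        have := ih (k + 1) u ht
        omega
    · have := ih (k + 1) v h
      omega

-- the min over all occurrences is realised at the first one (= .find)
theorem pvAllMin_find (c : Char) (s : List Char) (k : Nat) :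
    pvAllMin c s (k : Int) =
      (if PySem.Chars.find.go [c] s k = -1 then none
       else some (PySem.Chars.find.go [c] s k + 1)) := by
  induction s generalizing k with
  | nil => simp [pvAllMin, PySem.Chars.find.go]
  | cons x t ih =>
    by_cases hx : x = c
    · have hpre : [c].isPrefixOf (x :: t) = true := by simp [List.isPrefixOf, hx]
      rw [show PySem.Chars.find.go [c] (x :: t) k = (k : Int) by
        simp [PySem.Chars.find.go, hpre]]
      have hk : ((k : Int)) ≠ -1 := by omega
      simp only [pvAllMin, hx, hk]
      cases ht : pvAllMin c t ((k : Int) + 1) with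
      | none => simp [pvMerge]
      | some u =>
        have hu := pvAllMin_lb c t _ _ ht
        simp [pvMerge]
        omega
    · have hpre : [c].isPrefixOf (x :: t) = false := by
        simp [List.isPrefixOf]; exact fun h => hx h.symm
      rw [show PySem.Chars.find.go [c] (x :: t) k = PySem.Chars.find.go [c] t (k + 1) by
        simp [PySem.Chars.find.go, hpre]]
      have : ((k : Int) + 1) = ((k + 1 : Nat) : Int) := by push_cast; ring
      simp only [pvAllMin, if_neg hx, this, ih (k + 1)]
      rfl

-- each B step is pvMerge with that layout's contribution
theorem pvBestStep_eq (ch : Char) (m : Option Int) (layout : String) :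
    pvBestStep ch m layout = pvMerge m (pvAllMin ch layout.toList 0) := by
  have h0 : pvAllMin ch layout.toList ((0 : Nat) : Int) =
      (if PySem.Chars.find.go [ch] layout.toList 0 = -1 then none
       else some (PySem.Chars.find.go [ch] layout.toList 0 + 1)) :=
    pvAllMin_find ch layout.toList 0
  have hfind : PySem.Str.find layout (String.ofList [ch]) =
      PySem.Chars.find.go [ch] layout.toList 0 := by
    simp [PySem.Str.find, PySem.Chars.find]
  simp only [Nat.cast_zero] at h0
  unfold pvBestStep
  rw [hfind, h0]
  by_cases hneg : PySem.Chars.find.go [ch] layout.toList 0 = -1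
  · cases m <;> simp [hneg, pvMerge]
  · cases m with
    | none => simp [hneg, pvMerge]
    | some v =>
      simp only [hneg]
      by_cases hlt : PySem.Chars.find.go [ch] layout.toList 0 + 1 < v
      · simp [hlt, pvMerge, min_def]
      · simp [hlt, pvMerge, min_def]

theorem pvBest_eq (a : List String) (ch : Char) :
    pvBest a ch = a.foldl (fun g s => pvMerge g (pvAllMin ch s.toList 0)) none := by
  unfold pvBest
  exact PySem.List.foldl_congr_mem a _ _ none (fun m s _ => pvBestStep_eq ch m s)

-- invariant of A's building loop: tmp is exactly the key set of min_alpha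
def pvInv (tmp : List Char) (d : PySem.Dict Char Int) : Prop :=
  ∀ c, tmp.contains c = (d.get? c).isSome

-- inner loop of A over one layout: pointwise effect on the dict
theorem pvInner_eq (s : List Char) :
    ∀ (k : Int) (tmp : List Char) (d : PySem.Dict Char Int), pvInv tmp d →
      (∀ c, ((PySem.List.enumerate s k).foldl pvInnerStep (tmp, d)).2.get? c =
        pvMerge (d.get? c) (pvAllMin c s k)) ∧
      pvInv ((PySem.List.enumerate s k).foldl pvInnerStep (tmp, d)).1
        ((PySem.List.enumerate s k).foldl pvInnerStep (tmp, d)).2 := by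
  induction s with
  | nil =>
    intro k tmp d hinv
    simp only [PySem.List.enumerate, List.foldl_nil, pvAllMin]
    exact ⟨fun c => by cases d.get? c <;> rfl, hinv⟩
  | cons x t ih =>
    intro k tmp d hinv
    rw [PySem.List.enumerate_cons]
    simp only [List.foldl_cons]
    by_cases hmem : tmp.contains x = true
    · have hxmem : x ∈ tmp := by simpa using hmem
      have hstep : pvInnerStep (tmp, d) (k, x) =
          (tmp, d.insert x (min (d.getD x 0) (k + 1))) := by
        simp [pvInnerStep, hxmem]
      rw [hstep]
      obtain ⟨v, hv⟩ : ∃ v, d.get? x = some v := by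
        have := hinv x; rw [hmem] at this
        exact Option.isSome_iff_exists.mp this.symm
      have hgetD : d.getD x 0 = v := by
        simp [PySem.Dict.getD_eq_get?_getD, hv]
      have hinv' : pvInv tmp (d.insert x (min (d.getD x 0) (k + 1))) := by
        intro c
        rw [PySem.Dict.get?_insert]
        by_cases hc : c = x
        · subst hc; simpa using hmem
        · simp only [if_neg hc]; exact hinv c
      obtain ⟨hget, hinv''⟩ := ih (k + 1) tmp _ hinv'
      refine ⟨fun c => ?_, hinv''⟩
      rw [hget c, PySem.Dict.get?_insert]
      by_cases hc : c = x
      · subst hc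
        simp only [hv, hgetD, pvAllMin]
        exact pvMerge_min_assoc v (k + 1) (pvAllMin c t (k + 1))
      · simp only [if_neg hc, pvAllMin, if_neg (show ¬ x = c from fun h => hc h.symm)]
        rfl
    · have hxmem : x ∉ tmp := by simpa using hmem
      have hstep : pvInnerStep (tmp, d) (k, x) =
          (tmp ++ [x], d.insert x (k + 1)) := by
        simp [pvInnerStep, hxmem]
      rw [hstep]
      have hnone : d.get? x = none := by
        have h1 : (d.get? x).isSome = false := by
          rw [← hinv x]; simpa using hxmem
        exact Option.not_isSome_iff_eq_none.mp (by simp [h1])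
      have hinv' : pvInv (tmp ++ [x]) (d.insert x (k + 1)) := by
        intro c
        rw [PySem.Dict.get?_insert]
        by_cases hc : c = x
        · subst hc; simp
        · have hcx : (c == x) = false := by simpa using hc
          simp only [if_neg hc, List.contains_append, List.contains_cons,
            List.contains_nil, hcx, Bool.or_false]
          exact hinv c
      obtain ⟨hget, hinv''⟩ := ih (k + 1) _ _ hinv'
      refine ⟨fun c => ?_, hinv''⟩
      rw [hget c, PySem.Dict.get?_insert]
      by_cases hc : c = x
      · subst hc
        simp only [hnone, pvAllMin]
        rfl
      · simp only [if_neg hc, pvAllMin, if_neg (show ¬ x = c from fun h => hc h.symm)]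
        rfl

-- outer loop of A: the final dict holds, per character, the fold of pvMerge over layouts
theorem pvBuild_eq (a : List String) :
    ∀ (tmp : List Char) (d : PySem.Dict Char Int), pvInv tmp d →
      ∀ c, ((a.foldl (fun st i => (PySem.List.enumerate i.toList 0).foldl pvInnerStep st)
          (tmp, d)).2).get? c =
        a.foldl (fun g s => pvMerge g (pvAllMin c s.toList 0)) (d.get? c) := by
  induction a with
  | nil => intro tmp d _ c; rfl
  | cons s rest ih =>
    intro tmp d hinv c
    simp only [List.foldl_cons]
    obtain ⟨hget, hinv'⟩ := pvInner_eq s.toList 0 tmp d hinv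
    have := ih _ _ hinv' c
    rw [show ((PySem.List.enumerate s.toList 0).foldl pvInnerStep (tmp, d)) =
        (((PySem.List.enumerate s.toList 0).foldl pvInnerStep (tmp, d)).1,
         ((PySem.List.enumerate s.toList 0).foldl pvInnerStep (tmp, d)).2) from rfl]
    rw [this, hget c]

-- A's dict lookup coincides with B's per-character scan
theorem pvLookup_eq_best (a : List String) (c : Char) :
    ((a.foldl (fun st i => (PySem.List.enumerate i.toList 0).foldl pvInnerStep st)
        ([], PySem.Dict.empty)).2).get? c = pvBest a c := by
  rw [pvBest_eq]
  have hinv : pvInv [] PySem.Dict.empty := by intro c; rfl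
  have := pvBuild_eq a [] PySem.Dict.empty hinv c
  simpa using this

-- per word: A's count-then-guard equals B's score
theorem pvScore_eq (a : List String) (d : PySem.Dict Char Int)
    (h : ∀ c, d.get? c = pvBest a c) (w : List Char) :
    ∀ t : Int, (if pvCountA d w t ≠ 0 then pvCountA d w t else -1) = pvScore a w t := by
  induction w with
  | nil => intro t; simp [pvCountA, pvScore]
  | cons ch rest ih =>
    intro t
    simp only [pvCountA, pvScore, ← h ch]
    cases d.get? ch with
    | none => simp
    | some v => exact ih (t + v)

-- ===== VERDICT (by name: the statement is the Claim_ definition above) =====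
theorem solution_spec : Claim_equal_solution := by
  intro a b _
  unfold Spec_solution solution solution_alt
  simp only []
  rw [PySem.List.foldl_congr_mem b _
    (fun answer (i : String) => answer ++ [pvScore a i.toList 0]) []
    (fun answer i _ => by
      simp only []
      rw [← pvScore_eq a _ (fun c => pvLookup_eq_best a c) i.toList 0]
      split <;> rfl)]
  rw [PySem.List.foldl_append_singleton_eq_map]
  simp
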